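-- pv_equiv track=rewrite | github.com/ILIAHHne63/converter | src/support_func.py | is_rational
-- ===== SOURCE A (Python) =====
-- def is_rational(x):
--     """Checks if x is rational """
--     point_counter = 0
--     if x[0] == "." or x[-1] == ".":
--         return 0
--     for sym in x:
--         if sym.isdigit():
--             continue
--         elif sym == ".":
--             point_counter += 1
--             if point_counter > 1:
--                 return 0
--             continue
--         else:
--             return 0
--     return 1
-- ===== SOURCE B (Python) =====
-- def is_rational(x):
--     """Checks if x is rational """
--     head, sep, tail = x.partition(".")
--     if sep:
--         return 1 if head.isdigit() and tail.isdigit() else 0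
--     return 1 if head.isdigit() else 0
-- ===== Notes on version B (the rewrite author's own statement) =====
-- stated objective: simpler
-- what changed: Replaced the leading/trailing-dot guard plus a character loop with a mutable dot counter by a single str.partition at the first dot followed by isdigit checks on the two halves.
import Mathlib
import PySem

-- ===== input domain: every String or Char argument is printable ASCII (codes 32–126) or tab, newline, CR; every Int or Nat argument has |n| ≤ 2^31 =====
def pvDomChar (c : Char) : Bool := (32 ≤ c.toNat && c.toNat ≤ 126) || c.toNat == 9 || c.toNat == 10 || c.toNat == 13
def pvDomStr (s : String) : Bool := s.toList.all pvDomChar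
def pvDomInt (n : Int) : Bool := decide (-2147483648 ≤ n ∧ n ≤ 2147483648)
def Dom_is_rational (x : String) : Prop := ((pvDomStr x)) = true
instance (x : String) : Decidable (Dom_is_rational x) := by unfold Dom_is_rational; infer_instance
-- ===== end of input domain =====

-- B replaces the guarded character loop with a dot counter by str.partition on the dot plus isdigit checks on the two halves (simpler; return-value equivalence; outside Pre_, on the empty string, A raises IndexError while B returns 0).


-- ===== PORT A =====
-- the for-loop over the characters, carrying point_counter
def isRatLoopA : List Char → Int → Int
  | [], _ => 1
  | c :: rest, pc =>
    if PySem.Chars.isdigit c then isRatLoopA rest pc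
    else if c = '.' then
      (if pc + 1 > 1 then 0 else isRatLoopA rest (pc + 1))
    else 0

def is_rational (x : String) : Int :=
  match PySem.Str.pyGet? x 0, PySem.Str.pyGet? x (-1) with
  | some a, some b =>
    if a = '.' ∨ b = '.' then 0 else isRatLoopA x.toList 0
  | _, _ => 0   -- x[0] raises IndexError on the empty string; excluded by Pre_

-- ===== PORT B =====
-- hand port of str.partition(".") for the one-character separator:
-- none = separator absent; some (h, t) = (part before first '.', part after it). Exact on all strings.
def partDot : List Char → Option (List Char × List Char)
  | [] => none
  | c :: rest =>
    if c = '.' then some ([], rest)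
    else (partDot rest).map (fun p => (c :: p.1, p.2))

def is_rational_alt (x : String) : Int :=
  match partDot x.toList with
  | some (h, t) =>
    if PySem.Chars.strIsdigit h && PySem.Chars.strIsdigit t then 1 else 0
  | none => if PySem.Chars.strIsdigit x.toList then 1 else 0

-- ===== PRECONDITION & SPEC =====
-- Pre_ excludes only the empty string, on which A raises IndexError.
def Pre_is_rational (x : String) : Prop := x ≠ ""
instance (x : String) : Decidable (Pre_is_rational x) := by unfold Pre_is_rational; infer_instance
def pvWitness_is_rational : String := "3.14"

def Spec_is_rational (x : String) (out : Int) : Prop := out = is_rational_alt x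
instance (x : String) (out : Int) : Decidable (Spec_is_rational x out) := by unfold Spec_is_rational; infer_instance

-- ===== CLAIM (what is proved, stated in full; the proofs are below) =====
def Claim_equal_is_rational : Prop := ∀ (x : String), Dom_is_rational x → Pre_is_rational x → Spec_is_rational x (is_rational x)

-- ===== LEMMAS AND PROOFS =====

lemma isdigit_ne_dot {c : Char} (h : PySem.Chars.isdigit c = true) : c ≠ '.' := by
  simp [PySem.Chars.isdigit] at h
  intro hc; subst hc; revert h; decide

lemma loopA_eq (cs : List Char) : ∀ pc : Int, pc = 0 ∨ pc = 1 →
    isRatLoopA cs pc =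
      if (cs.all (fun c => PySem.Chars.isdigit c || c = '.')) = true
          ∧ pc + (cs.count '.' : Int) ≤ 1 then 1 else 0 := by
  induction cs with
  | nil =>
    intro pc hpc
    rcases hpc with h | h <;> subst h <;> simp [isRatLoopA]
  | cons c rest ih =>
    intro pc hpc
    by_cases hd : PySem.Chars.isdigit c = true
    · have hne : c ≠ '.' := isdigit_ne_dot hd
      simp [isRatLoopA, hd, ih pc hpc, List.count_cons, hne]
    · by_cases hdot : c = '.'
      · subst hdot
        have hA : (('.' :: rest).all fun c => PySem.Chars.isdigit c || c = '.') = (rest.all fun c => PySem.Chars.isdigit c || c = '.') := by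
          simp
        have hC : ((('.' :: rest).count '.' : Nat) : Int) = ((rest.count '.' : Nat) : Int) + 1 := by
          simp [List.count_cons]
        rcases hpc with h | h <;> subst h
        · rw [show isRatLoopA ('.' :: rest) 0 = isRatLoopA rest 1 from by norm_num [isRatLoopA, hd]]
          rw [ih 1 (Or.inr rfl), hA, hC]
          by_cases hr : (rest.all fun c => PySem.Chars.isdigit c || c = '.') = true
          · simp only [hr, true_and]
            split_ifs with h1 h2 h2 <;> first | rfl | (exfalso; omega)
          · simp [hr]
        · rw [show isRatLoopA ('.' :: rest) 1 = 0 from by norm_num [isRatLoopA, hd]]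
          rw [hC, if_neg (by rintro ⟨-, h2⟩; omega)]
      · simp [isRatLoopA, hd, hdot]

lemma partDot_cons_dot (rest : List Char) : partDot ('.' :: rest) = some ([], rest) := rfl

lemma partDot_cons_ne {c : Char} (rest : List Char) (hc : c ≠ '.') :
    partDot (c :: rest) = (partDot rest).map (fun p => (c :: p.1, p.2)) := by
  simp [partDot, hc]

lemma partDot_none_iff (cs : List Char) : partDot cs = none ↔ '.' ∉ cs := by
  induction cs with
  | nil => simp [partDot]
  | cons c rest ih =>
    by_cases hc : c = '.'
    · subst hc; simp [partDot]
    · rw [partDot_cons_ne rest hc]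
      simp [Option.map_eq_none_iff, ih, Ne.symm hc]

lemma partDot_some_spec (cs : List Char) : ∀ h t, partDot cs = some (h, t) →
    cs = h ++ '.' :: t ∧ '.' ∉ h := by
  induction cs with
  | nil => intro h t hs; simp [partDot] at hs
  | cons c rest ih =>
    intro h t hs
    by_cases hc : c = '.'
    · subst hc
      rw [partDot_cons_dot] at hs
      obtain ⟨rfl, rfl⟩ : ([] : List Char) = h ∧ rest = t := by
        simpa [eq_comm] using hs
      simp
    · rw [partDot_cons_ne rest hc] at hs
      cases hr : partDot rest with
      | none => rw [hr] at hs; simp at hs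
      | some p =>
        rw [hr] at hs
        simp only [Option.map_some, Option.some.injEq, Prod.mk.injEq] at hs
        obtain ⟨hh, ht⟩ := hs
        obtain ⟨hsp, hnp⟩ := ih p.1 p.2 (by rw [hr])
        subst hh; subst ht
        refine ⟨by simp [hsp], ?_⟩
        simp only [List.mem_cons, not_or]
        exact ⟨fun hq => hc hq.symm, hnp⟩

-- last character of h ++ '.' :: t
lemma getLast?_append_dot (h t : List Char) (hne : t ≠ []) :
    (h ++ '.' :: t).getLast? = t.getLast? := by
  have hy : t.getLast?.isSome := List.getLast?_isSome.mpr hne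
  obtain ⟨y, hy⟩ := Option.isSome_iff_exists.mp hy
  rw [List.getLast?_append]
  simp [List.getLast?_cons, hy]

-- ===== VERDICT (by name: the statement is the Claim_ definition above) =====
theorem is_rational_spec : Claim_equal_is_rational := by
  intro x _ hpre
  unfold Spec_is_rational is_rational is_rational_alt
  have hcs : x.toList ≠ [] := by
    intro h
    exact hpre (String.toList_eq_nil_iff.mp h)
  obtain ⟨c, rest, hxe⟩ := List.exists_cons_of_ne_nil hcs
  have h0 : PySem.Str.pyGet? x 0 = some c := by
    simp [PySem.Str.pyGet?_eq, hxe, PySem.List.pyGet?_zero_cons]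
  obtain ⟨init, lastc, hil⟩ := (List.eq_nil_or_concat x.toList).resolve_left hcs
  have h1 : PySem.Str.pyGet? x (-1) = some lastc := by
    simp [PySem.Str.pyGet?_eq, hil, PySem.List.pyGet?_neg_one_append_singleton]
  rw [h0, h1]
  by_cases hcd : c = '.'
  · -- first char is '.': A returns 0; partDot gives ([], rest), strIsdigit [] = false
    simp only [hcd, true_or, if_true]
    have : partDot x.toList = some ([], rest) := by
      rw [hxe, hcd, partDot_cons_dot]
    rw [this]
    simp [PySem.Chars.strIsdigit]
  · by_cases hld : lastc = '.'
    · -- last char is '.': A returns 0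
      simp only [hcd, hld, or_true, if_true]
      cases hp : partDot x.toList with
      | none =>
        exfalso
        rw [partDot_none_iff] at hp
        exact hp (by rw [hil, hld]; simp)
      | some p =>
        obtain ⟨h, t⟩ := p
        obtain ⟨hsplit, hnh⟩ := partDot_some_spec _ _ _ hp
        -- t's last char is '.' or t = [] : strIsdigit t = false
        rcases eq_or_ne t [] with rfl | htne
        · simp [PySem.Chars.strIsdigit]
        · have hlast : t.getLast? = some '.' := by
            have e1 : x.toList.getLast? = some lastc := by simp [hil]
            rw [hsplit, getLast?_append_dot h t htne] at e1
            rw [e1, hld]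
          have hmem : '.' ∈ t := by
            obtain ⟨ys, rfl⟩ := List.getLast?_eq_some_iff.mp hlast
            simp
          have hfall : t.all PySem.Chars.isdigit = false := by
            rw [Bool.eq_false_iff]
            intro hall
            have := List.all_eq_true.mp hall '.' hmem
            revert this; decide
          simp [PySem.Chars.strIsdigit, hfall]
    · -- main case: neither first nor last is '.'
      simp only [hcd, hld, or_self, if_false, or_false, false_or]
      rw [loopA_eq x.toList 0 (Or.inl rfl)]
      cases hp : partDot x.toList with
      | none =>
        have hnd : '.' ∉ x.toList := (partDot_none_iff _).mp hp
        have hcnt : x.toList.count '.' = 0 := List.count_eq_zero.mpr hnd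
        have heq : (x.toList.all fun c => PySem.Chars.isdigit c || c = '.') = x.toList.all PySem.Chars.isdigit := by
          refine Bool.eq_iff_iff.mpr ?_
          simp only [List.all_eq_true]
          constructor <;> intro hall a ha <;> have := hall a ha
          · have hane : a ≠ '.' := by rintro rfl; exact hnd ha
            simpa [hane] using this
          · simp [this]
        rw [hcnt, heq]
        have hnum : ((0:Int) + ((0:Nat):Int) ≤ 1) := by norm_num
        by_cases hA : x.toList.all PySem.Chars.isdigit = true
        · simp [hA, hnum, PySem.Chars.strIsdigit, hcs]
        · simp [hA, PySem.Chars.strIsdigit, Bool.eq_false_iff.mpr hA]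
      | some p =>
        obtain ⟨h, t⟩ := p
        obtain ⟨hsplit, hnh⟩ := partDot_some_spec _ _ _ hp
        have hhne : h ≠ [] := by
          rintro rfl
          have hhe := hsplit.symm.trans hxe
          simp at hhe
          exact hcd hhe.1.symm
        have htne : t ≠ [] := by
          rintro rfl
          have e1 : x.toList.getLast? = some lastc := by simp [hil]
          rw [hsplit] at e1
          simp at e1
          exact hld e1.symm
        have hcnt : x.toList.count '.' = h.count '.' + 1 + t.count '.' := by
          simp [hsplit, List.count_append, List.count_cons]
          ring
        have hch : h.count '.' = 0 := List.count_eq_zero.mpr hnh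
        by_cases hall : (x.toList.all (fun c => PySem.Chars.isdigit c || c = '.')) = true
            ∧ (0 : Int) + (x.toList.count '.' : Int) ≤ 1
        · obtain ⟨ha, hc1⟩ := hall
          have hct : t.count '.' = 0 := by
            rw [hcnt, hch] at hc1; push_cast at hc1; omega
          have hnt : '.' ∉ t := List.count_eq_zero.mp hct
          have ha' := List.all_eq_true.mp ha
          have hhd : h.all PySem.Chars.isdigit = true := by
            rw [List.all_eq_true]; intro a haa
            have := ha' a (by rw [hsplit]; simp [haa])
            have hane : a ≠ '.' := by rintro rfl; exact hnh haa
            simpa [hane] using this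
          have htd : t.all PySem.Chars.isdigit = true := by
            rw [List.all_eq_true]; intro a haa
            have := ha' a (by rw [hsplit]; simp [haa])
            have hane : a ≠ '.' := by rintro rfl; exact hnt haa
            simpa [hane] using this
          rw [if_pos ⟨ha, hc1⟩]
          have hH : PySem.Chars.strIsdigit h = true := by
            simp [PySem.Chars.strIsdigit, hhne, hhd]
          have hT : PySem.Chars.strIsdigit t = true := by
            simp [PySem.Chars.strIsdigit, htne, htd]
          simp [hH, hT]
        · rw [if_neg hall]
          rw [not_and_or] at hall
          rcases hall with ha | hc1
          · -- some char is neither digit nor '.': it is in h or t and kills strIsdigit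
            simp only [List.all_eq_true, not_forall] at ha
            obtain ⟨a, ha_mem, ha_bad⟩ := ha
            have hbad : ¬ (PySem.Chars.isdigit a || a = '.') = true := by simpa using ha_bad
            simp only [Bool.or_eq_true, decide_eq_true_eq, not_or] at hbad
            obtain ⟨hnd, hane⟩ := hbad
            rw [hsplit] at ha_mem
            simp [hane] at ha_mem
            rcases ha_mem with hm | hm
            · have hfall : h.all PySem.Chars.isdigit = false := by
                rw [Bool.eq_false_iff]
                intro hx; exact hnd (List.all_eq_true.mp hx a hm)
              simp [PySem.Chars.strIsdigit, hfall]
            · have hfall : t.all PySem.Chars.isdigit = false := by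
                rw [Bool.eq_false_iff]
                intro hx; exact hnd (List.all_eq_true.mp hx a hm)
              simp [PySem.Chars.strIsdigit, hfall]
          · -- more than one '.': t contains a '.', so strIsdigit t = false
            have hct : t.count '.' ≠ 0 := by
              intro hz; apply hc1; rw [hcnt, hch, hz]; push_cast
            have hnt : '.' ∈ t := by
              by_contra hno
              exact hct (List.count_eq_zero.mpr hno)
            have hfall : t.all PySem.Chars.isdigit = false := by
              rw [Bool.eq_false_iff]
              intro hx
              have := List.all_eq_true.mp hx '.' hnt
              revert this; decide
            simp [PySem.Chars.strIsdigit, hfall]
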